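-- pv_equiv track=rewrite | github.com/green-fox-academy/tedlsx | week-01/day-3/solu4func.py | search_palindrome
-- ===== SOURCE A (Python) =====
-- def palindrom(s):
--     l = list(s)
--     l_new = l[::-1]
--     sep = ""
--     l_word = sep.join(l_new)
--     return (s + l_word)
--
-- def search_palindrome( para):
--     mylist = []
--     for i in range(0,len(para)):
--         s_1 = ""
--         for j in range(i+1 , len(para)):
--             s_1 += para[j]
--             s_2 = para[i] + s_1
--             pal = palindrom(s_2)
--             pal = str(pal)
--             len_pal = len(pal)
--             pal_new = pal[ :(int((len_pal/2)-1))] + pal[int(len_pal/2) : ]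
--
--             if int(len_pal/2) > len(s_2):
--                 continue
--             elif pal_new in para:
--                 mylist.append(pal_new)
--     return mylist
-- ===== SOURCE B (Python) =====
-- def search_palindrome(para):
--     n = len(para)
--     cap = (n + 1) // 2
--     # arm[j] = largest m (1 <= m <= min(j+1, cap)) such that the odd palindrome whose
--     # left arm is para[j-m+1:j+1] (center para[j]) occurs somewhere in para.
--     # Occurrence is downward closed in m (an occurrence of the length-(2m-1)
--     # palindrome contains the length-(2m-3) one at its center), so binary search works.
--     arm = [0] * n
--     for j in range(n):
--         lo, hi = 1, min(j + 1, cap)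
--         while lo < hi:
--             mid = (lo + hi + 1) // 2
--             s = para[j - mid + 1:j + 1]
--             if s + s[-2::-1] in para:
--                 lo = mid
--             else:
--                 hi = mid - 1
--         arm[j] = lo
--     out = []
--     for i in range(n):
--         for j in range(i + 1, n):
--             if j - i + 1 <= arm[j]:
--                 s = para[i:j + 1]
--                 out.append(s + s[-2::-1])
--     return out
-- ===== Notes on version B (the rewrite author's own statement) =====
-- stated objective: faster
-- what changed: B first computes, for each centre j, the longest palindrome arm by binary search (valid because an occurring odd palindrome's central part also occurs), then emits each pair (i,j) by a constant-time arithmetic comparison against that arm table, eliminating A's per-pair substring scan entirely.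
import Mathlib
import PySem

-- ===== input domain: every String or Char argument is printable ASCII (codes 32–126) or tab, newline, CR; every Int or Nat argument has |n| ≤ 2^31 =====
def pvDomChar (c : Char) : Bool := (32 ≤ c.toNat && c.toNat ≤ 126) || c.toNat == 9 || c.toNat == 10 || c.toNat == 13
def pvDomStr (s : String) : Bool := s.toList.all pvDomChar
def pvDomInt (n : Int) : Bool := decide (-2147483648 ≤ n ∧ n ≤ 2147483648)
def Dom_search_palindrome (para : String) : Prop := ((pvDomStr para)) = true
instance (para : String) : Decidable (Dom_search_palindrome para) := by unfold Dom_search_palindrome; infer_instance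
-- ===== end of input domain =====

-- B replaces A's per-pair substring scan by one arm table: for each centre j a binary search
-- (valid because an occurring odd palindrome's central part also occurs) finds the longest arm,
-- after which each pair (i, j) is decided by pure arithmetic (objective: faster; measured by the check).

-- ===== PORT A =====
-- palindrom(s): list(s)[::-1] joined back and appended to s
def pvPalindrom (s : List Char) : List Char :=
  s ++ ((PySem.List.slice? s none none (-1)).getD [])

-- the body of A's inner `for j` loop; state = (s_1, mylist)
def pvABody (cs : List Char) (i : Int) (st : List Char × List (List Char)) (j : Int) :
    List Char × List (List Char) :=
  let s1 := st.1 ++ [(PySem.List.pyGet? cs j).getD ' ']      -- j is always in range here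
  let s2 := (PySem.List.pyGet? cs i).getD ' ' :: s1           -- para[i] + s_1
  let pal := pvPalindrom s2
  let lenPal := pal.length
  -- len_pal is even, so Python's float division is exact: int(len_pal/2) = lenPal/2,
  -- int((len_pal/2)-1) = lenPal/2 - 1
  let half := lenPal / 2
  let palNew := PySem.List.slice pal none (some ((half : Int) - 1)) ++
                PySem.List.slice pal (some (half : Int)) none
  if (half : Int) > (s2.length : Int) then st
  else if PySem.Chars.isIn palNew cs then (s1, st.2 ++ [palNew]) else (s1, st.2)

def search_palindrome (para : String) : List String :=
  let cs := para.toList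
  let res := (PySem.List.pyRange 0 cs.length).foldl
      (fun acc i => ((PySem.List.pyRange (i + 1) cs.length).foldl (pvABody cs i) ([], acc)).2) []
  res.map String.ofList

-- ===== PORT B =====
-- s + s[-2::-1]: the odd palindrome whose left half (arm) is s
def pvBCand (s : List Char) : List Char :=
  s ++ ((PySem.List.slice? s (some (-2)) none (-1)).getD [])

-- B's while-loop: binary search for the largest m in [lo, hi] whose centred arm occurs in cs
def pvBsearch (cs : List Char) (j : Int) (lo hi : Int) : Int :=
  if h : lo < hi then
    let mid := PySem.Int.floordiv (lo + hi + 1) 2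
    if PySem.Chars.isIn
        (pvBCand (PySem.List.slice cs (some (j - mid + 1)) (some (j + 1)))) cs
    then pvBsearch cs j mid hi
    else pvBsearch cs j lo (mid - 1)
  else lo
termination_by (hi - lo).toNat
decreasing_by
  · have hb := PySem.Int.floordiv_two_mid_bounds (lo := lo + 1) (hi := hi) (by omega)
    rw [show lo + 1 + hi = lo + hi + 1 by ring] at hb
    simp only [mid] at *
    omega
  · have hb := PySem.Int.floordiv_two_mid_bounds (lo := lo + 1) (hi := hi) (by omega)
    rw [show lo + 1 + hi = lo + hi + 1 by ring] at hb
    simp only [mid] at *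
    omega

-- the body of B's emission loop (arithmetic test against the arm table)
def pvBEmit (cs : List Char) (arm : List Int) (i : Int)
    (acc : List (List Char)) (j : Int) : List (List Char) :=
  if j - i + 1 ≤ PySem.List.pyGetD arm j 0 then
    acc ++ [pvBCand (PySem.List.slice cs (some i) (some (j + 1)))]
  else acc

def search_palindrome_alt (para : String) : List String :=
  let cs := para.toList
  let n : Int := (cs.length : Int)
  let cap := PySem.Int.floordiv (n + 1) 2
  let arm := (PySem.List.pyRange 0 n).map (fun j => pvBsearch cs j 1 (min (j + 1) cap))
  let out := (PySem.List.pyRange 0 n).foldl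
      (fun acc i => (PySem.List.pyRange (i + 1) n).foldl (pvBEmit cs arm i) acc) []
  out.map String.ofList

-- ===== PRECONDITION & SPEC =====
def Spec_search_palindrome (para : String) (out : List String) : Prop := out = search_palindrome_alt para
instance (para : String) (out : List String) : Decidable (Spec_search_palindrome para out) := by unfold Spec_search_palindrome; infer_instance

-- ===== CLAIM (what is proved, stated in full; the proofs are below) =====
def Claim_equal_search_palindrome : Prop := ∀ (para : String), Dom_search_palindrome para → Spec_search_palindrome para (search_palindrome para)

-- ===== LEMMAS AND PROOFS =====

-- the candidate that both programs build from the window [i, j] of cs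
def pvCand (cs : List Char) (i j : Nat) : List Char :=
  (cs.drop i).take (j + 1 - i) ++ ((cs.drop i).take (j + 1 - i)).dropLast.reverse

-- A's shape of the candidate = B's shape
theorem pv_dropLast_append_reverse (l : List Char) :
    l.dropLast ++ l.reverse = l ++ l.dropLast.reverse := by
  rcases eq_or_ne l [] with rfl | h
  · simp
  · conv_lhs => rw [show l.reverse = l.getLast h :: l.dropLast.reverse by
        conv_lhs => rw [← List.dropLast_append_getLast h]
        simp]
    rw [show l.dropLast ++ l.getLast h :: l.dropLast.reverse
          = (l.dropLast ++ [l.getLast h]) ++ l.dropLast.reverse by simp]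
    rw [List.dropLast_append_getLast h]

-- s[-2::-1] = (dropLast s).reverse
theorem pv_slice_neg2_rev (l : List Char) :
    PySem.List.slice? l (some (-2)) none (-1) = some l.dropLast.reverse := by
  rcases l with _ | ⟨a, t⟩
  · simp [PySem.List.slice?, PySem.List.sliceIndices]
  · simp only [PySem.List.slice?, PySem.List.sliceIndices]
    norm_num
    have hcnt : (if 0 < t.length then (-2 + ((t.length : Int) + 1) + 1).toNat else 0) = t.length := by
      split_ifs with h <;> omega
    rw [hcnt]
    have hstep : ∀ x ∈ List.range t.length,
        (a :: t)[(-2 + ((t.length : Int) + 1) + -(x : Int)).toNat]?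
          = some ((a :: t).getD (t.length - 1 - x) ' ') := by
      intro x hx
      rw [List.mem_range] at hx
      have hidx : (-2 + ((t.length : Int) + 1) + -(x : Int)).toNat = t.length - 1 - x := by omega
      rw [hidx, List.getElem?_eq_getElem (by simp; omega),
        List.getD_eq_getElem _ _ (by simp; omega)]
    rw [List.filterMap_congr hstep]
    rw [show (fun x => some ((a :: t).getD (t.length - 1 - x) ' '))
          = some ∘ (fun x => (a :: t).getD (t.length - 1 - x) ' ') from rfl, List.filterMap_eq_map]
    apply List.ext_getElem
    · simp
    · intro i h1 h2
      simp only [List.getElem_map, List.getElem_range, List.getElem_reverse, List.getElem_dropLast]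
      rw [List.getD_eq_getElem _ _ (by simp at h1 ⊢; omega)]
      congr 1
      simp at h1 h2 ⊢

-- pyRange over nat bounds is a mapped List.range'
theorem pv_pyRange_natCast (a b : Nat) :
    PySem.List.pyRange (a : Int) (b : Int) = (List.range' a (b - a)).map Int.ofNat := by
  rw [PySem.List.pyRange_of_pos _ _ (by norm_num : (0:Int) < 1)]
  by_cases hab : a < b
  · have h1 : (((b : Int) - a + 1 - 1) / 1).toNat = b - a := by omega
    rw [if_pos (show ((a:Int) < b) from by exact_mod_cast hab), h1]
    conv_rhs => rw [List.range'_eq_map_range, List.map_map]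
    apply List.map_congr_left
    intro k _
    simp only [Function.comp_apply, Int.ofNat_eq_natCast]
    push_cast
    ring
  · have h0 : b - a = 0 := by omega
    simp [h0, show ¬ ((a:Int) < b) by exact_mod_cast hab]

theorem pv_cand_length (cs : List Char) (i j : Nat) (hij : i < j) (hj : j < cs.length) :
    (pvCand cs i j).length = 2 * (j + 1 - i) - 1 := by
  simp [pvCand]
  omega

-- candidates from windows reaching past (n+1)//2 are longer than the text, so never found
theorem pv_prune (cs : List Char) (i j : Nat) (hj : j < cs.length)
    (hfar : i + (cs.length + 1) / 2 ≤ j) :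
    PySem.Chars.isIn (pvCand cs i j) cs = false := by
  have hij : i < j := by omega
  rw [PySem.Chars.isIn_eq_false_iff]
  intro h
  have := h.length_le
  rw [pv_cand_length cs i j hij hj] at this
  omega

-- the palindrome built by A from the half s2
theorem pv_palNew (s2 : List Char) (h2 : 1 ≤ s2.length) :
    PySem.List.slice (s2 ++ s2.reverse) none (some ((s2.length : Int) - 1)) ++
      PySem.List.slice (s2 ++ s2.reverse) (some (s2.length : Int)) none
    = s2 ++ s2.dropLast.reverse := by
  rw [show (s2.length : Int) - 1 = ((s2.length - 1 : Nat) : Int) by push_cast [Nat.cast_sub h2]; ring,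
    PySem.List.slice_to_natCast, PySem.List.slice_from_natCast,
    List.take_append_of_le_length (by omega), ← List.dropLast_eq_take,
    show List.drop s2.length (s2 ++ s2.reverse) = s2.reverse from by
      conv_lhs => rw [show s2.length = s2.length + 0 by ring]
      simp,
    pv_dropLast_append_reverse]

-- A's inner loop, characterised
theorem pv_A_inner (cs : List Char) (i : Nat) (hi : i < cs.length) (d : Nat)
    (hd : i + 1 + d ≤ cs.length) (acc : List (List Char)) :
    (PySem.List.pyRange ((i : Int) + 1) ((i : Int) + 1 + d)).foldl (pvABody cs (i : Int)) ([], acc)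
    = ((cs.drop (i + 1)).take d,
       acc ++ ((List.range' (i + 1) d).filter
         (fun j => PySem.Chars.isIn (pvCand cs i j) cs)).map (pvCand cs i)) := by
  rw [show ((i : Int) + 1) = ((i + 1 : Nat) : Int) by omega,
    show (((i : Nat) + 1 : Nat) : Int) + d = ((i + 1 + d : Nat) : Int) by omega,
    pv_pyRange_natCast, show (i + 1 + d) - (i + 1) = d by omega, List.foldl_map]
  induction d with
  | zero => simp
  | succ d ih =>
    rw [List.range'_concat, List.foldl_append, ih (by omega)]
    simp only [List.foldl_cons, List.foldl_nil, one_mul]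
    have hstep : pvABody cs (i : Int)
        ((cs.drop (i + 1)).take d,
          acc ++ ((List.range' (i + 1) d).filter
            (fun j => PySem.Chars.isIn (pvCand cs i j) cs)).map (pvCand cs i))
        (Int.ofNat (i + 1 + d))
        = ((cs.drop (i + 1)).take (d + 1),
           acc ++ ((List.range' (i + 1) d).filter
             (fun j => PySem.Chars.isIn (pvCand cs i j) cs)).map (pvCand cs i)
             ++ (if PySem.Chars.isIn (pvCand cs i (i + 1 + d)) cs
                 then [pvCand cs i (i + 1 + d)] else [])) := by
      have hs1 : (cs.drop (i + 1)).take d ++ [cs[i + 1 + d]'(by omega)]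
          = (cs.drop (i + 1)).take (d + 1) := by
        rw [List.take_add_one]
        congr 1
        rw [List.getElem?_drop, List.getElem?_eq_getElem (by omega)]
        rfl
      have hs2 : cs[i]'hi :: (cs.drop (i + 1)).take (d + 1) = (cs.drop i).take (d + 2) := by
        rw [← List.getElem_cons_drop hi]
        rfl
      simp only [pvABody, pvPalindrom, Int.ofNat_eq_natCast, PySem.List.pyGet?_natCast,
        List.getElem?_eq_getElem (show i + 1 + d < cs.length by omega),
        List.getElem?_eq_getElem hi, Option.getD_some, PySem.List.slice?_none_none_neg_one,
        hs1, hs2]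
      set s2 := (cs.drop i).take (d + 2) with hs2def
      have hlen2 : s2.length = d + 2 := by
        simp [hs2def]
        omega
      have hL : (s2 ++ s2.reverse).length = 2 * s2.length := by
        simp
        ring
      rw [hL, Nat.mul_div_cancel_left s2.length (by norm_num)]
      rw [if_neg (by omega)]
      rw [pv_palNew s2 (by omega)]
      have hcand : s2 ++ s2.dropLast.reverse = pvCand cs i (i + 1 + d) := by
        rw [pvCand, show (i + 1 + d) + 1 - i = d + 2 by omega]
      rw [hcand]
      split_ifs with hIn <;> simp
    rw [hstep, List.filter_append, List.map_append, List.append_assoc]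
    congr 2
    simp only [List.filter_cons, List.filter_nil]
    split_ifs with hIn <;> simp

-- B's slice-built candidate is pvCand
theorem pv_bcand_natCast (cs : List Char) (i j : Nat) :
    pvBCand (PySem.List.slice cs (some (i : Int)) (some ((j : Int) + 1))) = pvCand cs i j := by
  rw [show (j : Int) + 1 = ((j + 1 : Nat) : Int) by push_cast; ring,
    PySem.List.slice_natCast, pvBCand, pv_slice_neg2_rev, pvCand]
  rfl

-- the same, in the centre/arm form used by the binary search
theorem pv_bcand_arm (cs : List Char) (j : Nat) (m : Int) (h1 : 1 ≤ m) (h2 : m ≤ (j : Int) + 1) :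
    pvBCand (PySem.List.slice cs (some ((j : Int) - m + 1)) (some ((j : Int) + 1)))
      = pvCand cs (j + 1 - m.toNat) j := by
  rw [show (j : Int) - m + 1 = ((j + 1 - m.toNat : Nat) : Int) by omega, pv_bcand_natCast]

-- a single character inside the text occurs in it
theorem pv_isIn_self (cs : List Char) (j : Nat) (hj : j < cs.length) :
    PySem.Chars.isIn (pvCand cs j j) cs = true := by
  have hcand : pvCand cs j j = [cs[j]'hj] := by
    rw [pvCand, show j + 1 - j = 1 by omega,
      List.drop_eq_getElem_cons hj, List.take_succ_cons, List.take_zero]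
    rfl
  rw [hcand, PySem.Chars.isIn_iff_infix]
  exact (List.singleton_infix_iff _ _).mpr (by simp)

-- stripping a window's first character keeps the candidate inside the extended one
theorem pv_cand_cons (cs : List Char) (i j : Nat) (hij : i < j) (hj : j < cs.length) :
    pvCand cs i j = cs[i]'(by omega) :: (pvCand cs (i + 1) j ++ [cs[i]'(by omega)]) := by
  unfold pvCand
  rw [List.drop_eq_getElem_cons (show i < cs.length by omega),
    show j + 1 - i = (j - i) + 1 by omega, List.take_succ_cons,
    show j + 1 - (i + 1) = j - i by omega]
  set t := (cs.drop (i + 1)).take (j - i) with ht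
  have htne : t ≠ [] := by
    have hlen : t.length = j - i := by rw [ht]; simp; omega
    intro h
    rw [h] at hlen
    simp at hlen
    omega
  rw [List.dropLast_cons_of_ne_nil htne]
  simp

-- occurrence of the candidate is downward closed in the arm (monotone in the left end)
theorem pv_isIn_mono (cs : List Char) (i i' j : Nat) (hii : i ≤ i') (hij : i' ≤ j)
    (hj : j < cs.length) (h : PySem.Chars.isIn (pvCand cs i j) cs = true) :
    PySem.Chars.isIn (pvCand cs i' j) cs = true := by
  obtain ⟨k, rfl⟩ : ∃ k, i' = i + k := ⟨i' - i, by omega⟩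
  clear hii
  induction k generalizing i with
  | zero => simpa using h
  | succ k ih =>
    have hstep : PySem.Chars.isIn (pvCand cs (i + 1) j) cs = true := by
      have hlt : i < j := by omega
      rw [PySem.Chars.isIn_iff_infix] at h ⊢
      refine List.IsInfix.trans ⟨[cs[i]'(by omega)], [cs[i]'(by omega)], ?_⟩ h
      rw [pv_cand_cons cs i j hlt hj]
      simp
    have := ih (i + 1) hstep (by omega)
    rwa [show i + 1 + k = i + (k + 1) by omega] at this

-- correctness of B's binary search over the downward-closed occurrence predicate
theorem pv_bsearch_spec (cs : List Char) (j : Nat) (hj : j < cs.length) :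
    ∀ fuel : Nat, ∀ lo hi : Int, (hi - lo).toNat ≤ fuel →
    1 ≤ lo → lo ≤ hi → hi ≤ (j : Int) + 1 →
    PySem.Chars.isIn (pvCand cs (j + 1 - lo.toNat) j) cs = true →
    1 ≤ pvBsearch cs j lo hi ∧ pvBsearch cs j lo hi ≤ hi ∧
    PySem.Chars.isIn (pvCand cs (j + 1 - (pvBsearch cs j lo hi).toNat) j) cs = true ∧
    ∀ m : Int, pvBsearch cs j lo hi < m → m ≤ hi →
      PySem.Chars.isIn (pvCand cs (j + 1 - m.toNat) j) cs = false := by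
  intro fuel
  induction fuel with
  | zero =>
    intro lo hi hfuel hlo hlohi hhi hP
    have : lo = hi := by omega
    subst this
    rw [pvBsearch, dif_neg (by omega)]
    exact ⟨hlo, le_refl _, hP, fun m h1 h2 => absurd (lt_of_lt_of_le h1 h2) (lt_irrefl _)⟩
  | succ f ih =>
    intro lo hi hfuel hlo hlohi hhi hP
    by_cases hlt : lo < hi
    · have hb := PySem.Int.floordiv_two_mid_bounds (lo := lo + 1) (hi := hi) (by omega)
      rw [show lo + 1 + hi = lo + hi + 1 by ring] at hb
      rw [pvBsearch, dif_pos hlt]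
      simp only
      set mid := PySem.Int.floordiv (lo + hi + 1) 2 with hmiddef
      have hmb1 : lo + 1 ≤ mid := hb.1
      have hmb2 : mid ≤ hi := hb.2
      rw [pv_bcand_arm cs j mid (by omega) (by omega)]
      by_cases htest : PySem.Chars.isIn (pvCand cs (j + 1 - mid.toNat) j) cs = true
      · rw [if_pos htest]
        have hrec := ih mid hi (by omega) (by omega) (by omega) hhi htest
        exact ⟨by omega, hrec.2.1, hrec.2.2.1, hrec.2.2.2⟩
      · rw [if_neg htest]
        have hrec := ih lo (mid - 1) (by omega) hlo (by omega) (by omega) hP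
        refine ⟨hrec.1, by omega, hrec.2.2.1, ?_⟩
        intro m h1 h2
        by_cases hm : m ≤ mid - 1
        · exact hrec.2.2.2 m h1 hm
        · -- mid ≤ m: occurrence at arm m would imply occurrence at arm mid
          rw [Bool.eq_false_iff]
          intro hMm
          exact htest (pv_isIn_mono cs (j + 1 - m.toNat) (j + 1 - mid.toNat) j
            (by omega) (by omega) hj hMm)
    · have : lo = hi := by omega
      subst this
      rw [pvBsearch, dif_neg (by omega)]
      exact ⟨hlo, le_refl _, hP, fun m h1 h2 => absurd (lt_of_lt_of_le h1 h2) (lt_irrefl _)⟩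

-- the occurrence test A runs on window [i, j] is the arithmetic test B runs against arm[j]
theorem pv_col (cs : List Char) (i j : Nat) (hij : i < j) (hj : j < cs.length) :
    PySem.Chars.isIn (pvCand cs i j) cs
      = decide ((j : Int) - i + 1 ≤
          pvBsearch cs j 1 (min ((j : Int) + 1)
            (PySem.Int.floordiv ((cs.length : Int) + 1) 2))) := by
  have hcap : PySem.Int.floordiv ((cs.length : Int) + 1) 2 = (((cs.length + 1) / 2 : Nat) : Int) := by
    exact_mod_cast PySem.Int.floordiv_natCast (cs.length + 1) 2
  set hi := min ((j : Int) + 1) (PySem.Int.floordiv ((cs.length : Int) + 1) 2) with hhidef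
  have hcapge : (1 : Int) ≤ PySem.Int.floordiv ((cs.length : Int) + 1) 2 := by
    rw [hcap]
    have : 1 ≤ (cs.length + 1) / 2 := by omega
    exact_mod_cast this
  have hhi1 : (1 : Int) ≤ hi := le_min (by omega) hcapge
  have hhile : hi ≤ (j : Int) + 1 := min_le_left _ _
  have hspec := pv_bsearch_spec cs j hj (hi - 1).toNat 1 hi (by omega) (le_refl _) hhi1 hhile
    (by rw [show j + 1 - (1 : Int).toNat = j by omega]; exact pv_isIn_self cs j hj)
  set r := pvBsearch cs j 1 hi with hrdef
  obtain ⟨hr1, hrhi, hrP, hrmax⟩ := hspec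
  have hm : ((j : Int) - i + 1).toNat = j + 1 - i := by omega
  rw [Bool.eq_iff_iff, decide_eq_true_iff]
  constructor
  · intro h
    by_contra hgt
    push Not at hgt
    have hmle : (j : Int) - i + 1 ≤ hi := by
      rw [hhidef]
      refine le_min (by omega) ?_
      rw [hcap]
      -- otherwise the candidate is longer than the text and never occurs
      by_contra hbig
      push Not at hbig
      have hfar : i + (cs.length + 1) / 2 ≤ j := by omega
      rw [pv_prune cs i j hj hfar] at h
      exact Bool.false_ne_true h
    have := hrmax ((j : Int) - i + 1) hgt hmle
    rw [hm, show j + 1 - (j + 1 - i) = i by omega] at this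
    rw [h] at this
    simp at this
  · intro h
    have hi0 : j + 1 - r.toNat ≤ i := by omega
    exact pv_isIn_mono cs (j + 1 - r.toNat) i j hi0 (by omega) hj hrP

-- B's emission loop, characterised (same filtered row as A's)
theorem pv_B_inner (cs : List Char) (arm : List Int)
    (harm : ∀ j : Nat, j < cs.length → PySem.List.pyGetD arm (j : Int) 0
      = pvBsearch cs (j : Int) 1 (min ((j : Int) + 1)
          (PySem.Int.floordiv ((cs.length : Int) + 1) 2)))
    (i : Nat) (hi : i < cs.length) (d : Nat) (hd : i + 1 + d ≤ cs.length)
    (acc : List (List Char)) :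
    (PySem.List.pyRange ((i : Int) + 1) ((i : Int) + 1 + d)).foldl (pvBEmit cs arm (i : Int)) acc
    = acc ++ ((List.range' (i + 1) d).filter
        (fun j => PySem.Chars.isIn (pvCand cs i j) cs)).map (pvCand cs i) := by
  rw [show ((i : Int) + 1) = ((i + 1 : Nat) : Int) by omega,
    show (((i : Nat) + 1 : Nat) : Int) + d = ((i + 1 + d : Nat) : Int) by omega,
    pv_pyRange_natCast, show (i + 1 + d) - (i + 1) = d by omega, List.foldl_map]
  have hbody : ∀ (ac : List (List Char)), ∀ j ∈ List.range' (i + 1) d,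
      pvBEmit cs arm (i : Int) ac (Int.ofNat j)
        = (if (fun j => PySem.Chars.isIn (pvCand cs i j) cs) j = true
           then ac ++ [pvCand cs i j] else ac) := by
    intro ac j hjmem
    rw [List.mem_range'_1] at hjmem
    have hjn : j < cs.length := by omega
    simp only [pvBEmit, Int.ofNat_eq_natCast]
    rw [harm j hjn, pv_bcand_natCast]
    have hcol := pv_col cs i j (by omega) hjn
    by_cases hc : ((j : Int) - i + 1 ≤ pvBsearch cs (j : Int) 1
        (min ((j : Int) + 1) (PySem.Int.floordiv ((cs.length : Int) + 1) 2)))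
    · rw [if_pos hc, if_pos (by rw [hcol]; exact decide_eq_true hc)]
    · rw [if_neg hc, if_neg (by simp only [hcol]; simpa using hc)]
  rw [PySem.List.foldl_congr_mem _ _ _ _ hbody, PySem.List.foldl_append_if]

-- ===== VERDICT (by name: the statement is the Claim_ definition above) =====
theorem search_palindrome_spec : Claim_equal_search_palindrome := by
  intro para _
  unfold Spec_search_palindrome search_palindrome search_palindrome_alt
  apply congrArg (List.map String.ofList)
  set cs := para.toList with hcs
  set arm := (PySem.List.pyRange 0 (cs.length : Int)).map
      (fun j => pvBsearch cs j 1 (min (j + 1)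
        (PySem.Int.floordiv ((cs.length : Int) + 1) 2))) with harmdef
  have harm : ∀ j : Nat, j < cs.length →
      PySem.List.pyGetD arm (j : Int) 0
        = pvBsearch cs (j : Int) 1 (min ((j : Int) + 1)
            (PySem.Int.floordiv ((cs.length : Int) + 1) 2)) := by
    intro j hj
    rw [harmdef]
    exact PySem.List.pyGetD_map_pyRange_of_nonneg _ _ _ _ (by omega) (by exact_mod_cast hj)
  rw [PySem.List.pyRange_zero_natCast, List.foldl_map, List.foldl_map]
  apply PySem.List.foldl_congr_mem
  intro acc i hi
  rw [List.mem_range] at hi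
  rw [show ((cs.length : Nat) : Int) = ((i : Nat) : Int) + 1 + ((cs.length - (i + 1) : Nat) : Int) by
      push_cast [Nat.cast_sub (show i + 1 ≤ cs.length by omega)]; ring]
  rw [pv_A_inner cs i hi (cs.length - (i + 1)) (by omega) acc,
    pv_B_inner cs arm harm i hi (cs.length - (i + 1)) (by omega) acc]
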